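-- pv_equiv track=rewrite | github.com/Rvannest/PCY_multihash | PCY_multihash.py | multihash_pcy
-- ===== SOURCE A (Python) =====
-- from collections import defaultdict
--
-- def hash_pair(pair, number_of_buckets, hash_function=1):
--     if hash_function == 1:
--         return sum(pair) % number_of_buckets
--     else:  # different hash function
--         return (pair[0] * pair[1]) % number_of_buckets
--
-- def multihash_pcy(each_baskets, supp_threshold, number_of_buckets):
--     # First Pass
--     single_itemcount = defaultdict(int)
--     count_of_buckets_1 = defaultdict(int)
--     count_of_buckets_2 = defaultdict(int)
--
--     for basket in each_baskets:
--         for item in basket: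
--             single_itemcount[item] += 1
--
--         for i in range(len(basket)):
--             for j in range(i+1, len(basket)):
--                 pair = tuple(sorted((basket[i], basket[j])))
--                 count_of_buckets_1[hash_pair(pair, number_of_buckets, hash_function=1)] += 1
--                 count_of_buckets_2[hash_pair(pair, number_of_buckets, hash_function=2)] += 1
--
--     # Second Pass
--     pair_counts = defaultdict(int)
--     frequent_single_items = set()
--     for k, v in single_itemcount.items():
--         if v >= supp_threshold:
--             frequent_single_items.add(k)
--
--     for basket in each_baskets:
--         for i in range(len(basket)):
--             for j in range(i+1, len(basket)):
--                 pair = tuple(sorted((basket[i], basket[j])))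
--                 if pair[0] in frequent_single_items and pair[1] in frequent_single_items:
--                     if count_of_buckets_1[hash_pair(pair, number_of_buckets, hash_function=1)] >= supp_threshold and \
--                        count_of_buckets_2[hash_pair(pair, number_of_buckets, hash_function=2)] >= supp_threshold:
--                         pair_counts[pair] += 1
--
--     frequent_pair_items = set()
--     for k, v in pair_counts.items():
--         if v >= supp_threshold:
--             frequent_pair_items.add(k)
--
--     return frequent_pair_items
-- ===== SOURCE B (Python) =====
-- from collections import Counter
--
-- def multihash_pcy(each_baskets, supp_threshold, number_of_buckets):
--     # One pass: count single items and all within-basket (i<j) sorted pairs.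
--     # No bucket hashing: a bucket's count is always >= the count of any pair
--     # hashing into it, so the bucket filters never exclude a frequent pair.
--     singles = Counter()
--     pairs = Counter()
--     for basket in each_baskets:
--         singles.update(basket)
--         n = len(basket)
--         for i in range(n):
--             for j in range(i + 1, n):
--                 a, b = basket[i], basket[j]
--                 pairs[(a, b) if a <= b else (b, a)] += 1
--     return {p for p, c in pairs.items()
--             if c >= supp_threshold
--             and singles[p[0]] >= supp_threshold
--             and singles[p[1]] >= supp_threshold}
-- ===== Notes on version B (the rewrite author's own statement) =====
-- stated objective: simpler
-- what changed: B replaces A's two-pass PCY multihash (two hash-bucket counters plus a frequent-singles set and a re-scan of all baskets) with a single pass building just an item Counter and a pair Counter, then filters pairs by their own count and their endpoints' counts; the bucket filters are dropped because a bucket's count always dominates the count of any pair hashing into it, so they never exclude a frequent pair. (Pre_ excludes the inputs where A raises ZeroDivisionError: number_of_buckets == 0 with a basket holding two or more items.)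
import Mathlib
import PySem

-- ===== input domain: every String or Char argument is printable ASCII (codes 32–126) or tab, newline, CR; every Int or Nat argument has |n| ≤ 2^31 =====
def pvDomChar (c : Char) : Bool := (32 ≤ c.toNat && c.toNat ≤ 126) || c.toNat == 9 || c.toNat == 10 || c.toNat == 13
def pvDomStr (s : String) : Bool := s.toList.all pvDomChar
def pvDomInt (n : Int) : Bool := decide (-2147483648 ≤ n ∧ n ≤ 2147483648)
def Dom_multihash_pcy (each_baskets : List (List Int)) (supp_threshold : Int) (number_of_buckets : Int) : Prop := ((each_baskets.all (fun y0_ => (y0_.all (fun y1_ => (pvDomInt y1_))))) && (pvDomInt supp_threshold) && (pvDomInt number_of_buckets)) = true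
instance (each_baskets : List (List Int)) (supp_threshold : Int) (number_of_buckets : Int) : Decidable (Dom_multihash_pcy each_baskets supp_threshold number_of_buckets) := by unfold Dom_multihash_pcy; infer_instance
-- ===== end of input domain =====

-- B replaces A's two-pass PCY multihash with one pass and two counters, dropping the bucket
-- filters (a bucket's count always dominates the count of any pair hashing into it, so they
-- never exclude a frequent pair); B is shorter and needs no hashing (equal cost overall).
-- Pre_ excludes only inputs where Python A raises ZeroDivisionError (number_of_buckets == 0
-- with some basket of length >= 2); the Lean port equality itself holds on all inputs.


-- ===== PORT A =====
-- tuple(sorted((x, y))): exact for a two-element tuple (Python's sort is ascending, stable)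
def sortedPair (x y : Int) : Int × Int := if x ≤ y then (x, y) else (y, x)

-- hash_pair(pair, number_of_buckets, hash_function); sum(pair) = pair.1 + pair.2; '%' is Python's floor mod
def hash_pair (pair : Int × Int) (number_of_buckets : Int) (hash_function : Int) : Int :=
  if hash_function = 1 then PySem.Int.mod (pair.1 + pair.2) number_of_buckets
  else PySem.Int.mod (pair.1 * pair.2) number_of_buckets

-- A's First Pass loop: single_itemcount, count_of_buckets_1, count_of_buckets_2
def firstPassA (number_of_buckets : Int) (each_baskets : List (List Int)) :
    PySem.Dict Int Int × PySem.Dict Int Int × PySem.Dict Int Int :=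
  each_baskets.foldl
    (fun st basket =>
      let single := basket.foldl (fun d item => d.modify item 0 (· + 1)) st.1
      let cbs :=
        (PySem.List.pyRange 0 (PySem.List.len basket) 1).foldl
          (fun (cbs : PySem.Dict Int Int × PySem.Dict Int Int) i =>
            (PySem.List.pyRange (i + 1) (PySem.List.len basket) 1).foldl
              (fun cbs j =>
                let pair := sortedPair (PySem.List.pyGetD basket i 0) (PySem.List.pyGetD basket j 0)
                (cbs.1.modify (hash_pair pair number_of_buckets 1) 0 (· + 1),
                 cbs.2.modify (hash_pair pair number_of_buckets 2) 0 (· + 1)))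
              cbs)
          (st.2.1, st.2.2)
      (single, cbs.1, cbs.2))
    (PySem.Dict.empty, PySem.Dict.empty, PySem.Dict.empty)

-- A's "collect the keys whose count meets the threshold" loop (used for the single items and again for the pairs)
def freqSelect {α : Type} [BEq α] (supp_threshold : Int) (d : PySem.Dict α Int) : PySem.Set α :=
  d.items.foldl
    (fun s kv => if kv.2 ≥ supp_threshold then PySem.Set.add s kv.1 else s)
    PySem.Set.empty

-- A's Second Pass loop building pair_counts
def secondPassA (each_baskets : List (List Int)) (frequent_single_items : PySem.Set Int)
    (cb1 cb2 : PySem.Dict Int Int) (supp_threshold number_of_buckets : Int) :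
    PySem.Dict (Int × Int) Int :=
  each_baskets.foldl
    (fun pc basket =>
      (PySem.List.pyRange 0 (PySem.List.len basket) 1).foldl
        (fun pc i =>
          (PySem.List.pyRange (i + 1) (PySem.List.len basket) 1).foldl
            (fun pc j =>
              if PySem.Set.contains frequent_single_items
                   (sortedPair (PySem.List.pyGetD basket i 0) (PySem.List.pyGetD basket j 0)).1 &&
                 PySem.Set.contains frequent_single_items
                   (sortedPair (PySem.List.pyGetD basket i 0) (PySem.List.pyGetD basket j 0)).2 then
                if cb1.getD (hash_pair (sortedPair (PySem.List.pyGetD basket i 0) (PySem.List.pyGetD basket j 0)) number_of_buckets 1) 0 ≥ supp_threshold ∧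
                   cb2.getD (hash_pair (sortedPair (PySem.List.pyGetD basket i 0) (PySem.List.pyGetD basket j 0)) number_of_buckets 2) 0 ≥ supp_threshold then
                  pc.modify (sortedPair (PySem.List.pyGetD basket i 0) (PySem.List.pyGetD basket j 0)) 0 (· + 1)
                else pc
              else pc)
            pc)
        pc)
    PySem.Dict.empty

def multihash_pcy (each_baskets : List (List Int)) (supp_threshold : Int) (number_of_buckets : Int) : List (Int × Int) :=
  let st := firstPassA number_of_buckets each_baskets
  let frequent_single_items := freqSelect supp_threshold st.1
  let pair_counts := secondPassA each_baskets frequent_single_items st.2.1 st.2.2 supp_threshold number_of_buckets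
  freqSelect supp_threshold pair_counts

-- ===== PORT B =====
-- B's single pass: singles = Counter of items, pairs = Counter of within-basket sorted pairs
def onePassB (each_baskets : List (List Int)) : PySem.Dict Int Int × PySem.Dict (Int × Int) Int :=
  each_baskets.foldl
    (fun st basket =>
      let singles := basket.foldl (fun d x => d.modify x 0 (· + 1)) st.1
      let pairs :=
        (PySem.List.pyRange 0 (PySem.List.len basket) 1).foldl
          (fun p i =>
            (PySem.List.pyRange (i + 1) (PySem.List.len basket) 1).foldl
              (fun p j =>
                -- (a, b) if a <= b else (b, a)
                p.modify (if PySem.List.pyGetD basket i 0 ≤ PySem.List.pyGetD basket j 0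
                          then (PySem.List.pyGetD basket i 0, PySem.List.pyGetD basket j 0)
                          else (PySem.List.pyGetD basket j 0, PySem.List.pyGetD basket i 0)) 0 (· + 1))
              p)
          st.2
      (singles, pairs))
    (PySem.Dict.empty, PySem.Dict.empty)

-- B's set comprehension over pairs.items()
def selectB (supp_threshold : Int) (singles : PySem.Dict Int Int)
    (pairs : PySem.Dict (Int × Int) Int) : PySem.Set (Int × Int) :=
  pairs.items.foldl
    (fun acc kv =>
      if kv.2 ≥ supp_threshold ∧ singles.getD kv.1.1 0 ≥ supp_threshold ∧ singles.getD kv.1.2 0 ≥ supp_threshold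
      then PySem.Set.add acc kv.1 else acc)
    PySem.Set.empty

def multihash_pcy_alt (each_baskets : List (List Int)) (supp_threshold : Int) (number_of_buckets : Int) : List (Int × Int) :=
  let st := onePassB each_baskets
  selectB supp_threshold st.1 st.2

-- ===== PRECONDITION & SPEC =====
-- Pre_ excludes exactly the inputs where Python A raises ZeroDivisionError:
-- number_of_buckets == 0 while some basket contains at least two items (a pair gets hashed).
def Pre_multihash_pcy (each_baskets : List (List Int)) (supp_threshold : Int) (number_of_buckets : Int) : Prop :=
  number_of_buckets ≠ 0 ∨ ∀ b ∈ each_baskets, b.length < 2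
instance (each_baskets : List (List Int)) (supp_threshold : Int) (number_of_buckets : Int) : Decidable (Pre_multihash_pcy each_baskets supp_threshold number_of_buckets) := by unfold Pre_multihash_pcy; infer_instance

def pvWitness_multihash_pcy : List (List Int) × Int × Int := ([[1, 2], [1, 2]], 2, 5)

def Spec_multihash_pcy (each_baskets : List (List Int)) (supp_threshold : Int) (number_of_buckets : Int) (out : List (Int × Int)) : Prop := out = multihash_pcy_alt each_baskets supp_threshold number_of_buckets
instance (each_baskets : List (List Int)) (supp_threshold : Int) (number_of_buckets : Int) (out : List (Int × Int)) : Decidable (Spec_multihash_pcy each_baskets supp_threshold number_of_buckets out) := by unfold Spec_multihash_pcy; infer_instance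

-- ===== CLAIM (what is proved, stated in full; the proofs are below) =====
def Claim_equal_multihash_pcy : Prop := ∀ (each_baskets : List (List Int)) (supp_threshold : Int) (number_of_buckets : Int), Dom_multihash_pcy each_baskets supp_threshold number_of_buckets → Pre_multihash_pcy each_baskets supp_threshold number_of_buckets → Spec_multihash_pcy each_baskets supp_threshold number_of_buckets (multihash_pcy each_baskets supp_threshold number_of_buckets)
-- ===== LEMMAS AND PROOFS =====

-- the stream of sorted within-basket pairs, in the order both programs enumerate them
def pairsOf (basket : List Int) : List (Int × Int) :=
  (PySem.List.pyRange 0 (PySem.List.len basket) 1).flatMap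
    (fun i => (PySem.List.pyRange (i + 1) (PySem.List.len basket) 1).map
      (fun j => sortedPair (PySem.List.pyGetD basket i 0) (PySem.List.pyGetD basket j 0)))

-- the nested index loops are a fold over the pair stream
theorem nested_foldl {β : Type} (basket : List Int) (f : β → (Int × Int) → β) (s : β) :
    (PySem.List.pyRange 0 (PySem.List.len basket) 1).foldl
      (fun s i => (PySem.List.pyRange (i + 1) (PySem.List.len basket) 1).foldl
        (fun s j => f s (sortedPair (PySem.List.pyGetD basket i 0) (PySem.List.pyGetD basket j 0))) s) s
    = (pairsOf basket).foldl f s := by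
  simp [pairsOf, List.foldl_flatMap, List.foldl_map]

-- A's first pass, from arbitrary starting dicts
theorem stA_eq (nb : Int) (ebs : List (List Int)) (s c1 c2 : PySem.Dict Int Int) :
    ebs.foldl
      (fun (st : PySem.Dict Int Int × PySem.Dict Int Int × PySem.Dict Int Int) basket =>
        let single := basket.foldl (fun d item => d.modify item 0 (· + 1)) st.1
        let cbs :=
          (PySem.List.pyRange 0 (PySem.List.len basket) 1).foldl
            (fun (cbs : PySem.Dict Int Int × PySem.Dict Int Int) i =>
              (PySem.List.pyRange (i + 1) (PySem.List.len basket) 1).foldl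
                (fun cbs j =>
                  let pair := sortedPair (PySem.List.pyGetD basket i 0) (PySem.List.pyGetD basket j 0)
                  (cbs.1.modify (hash_pair pair nb 1) 0 (· + 1),
                   cbs.2.modify (hash_pair pair nb 2) 0 (· + 1)))
                cbs)
            (st.2.1, st.2.2)
        (single, cbs.1, cbs.2))
      (s, c1, c2)
    = (ebs.flatten.foldl (fun d x => d.modify x 0 (· + 1)) s,
       ((ebs.flatMap pairsOf).map (fun p => hash_pair p nb 1)).foldl (fun d x => d.modify x 0 (· + 1)) c1,
       ((ebs.flatMap pairsOf).map (fun p => hash_pair p nb 2)).foldl (fun d x => d.modify x 0 (· + 1)) c2) := by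
  induction ebs generalizing s c1 c2 with
  | nil => rfl
  | cons b ebs ih =>
    simp only [List.foldl_cons]
    rw [ih]
    rw [nested_foldl b
      (fun (cbs : PySem.Dict Int Int × PySem.Dict Int Int) pair =>
        (cbs.1.modify (hash_pair pair nb 1) 0 (· + 1),
         cbs.2.modify (hash_pair pair nb 2) 0 (· + 1))) (c1, c2)]
    rw [PySem.List.foldl_prod_mk
      (fun (d : PySem.Dict Int Int) p => d.modify (hash_pair p nb 1) 0 (· + 1))
      (fun (d : PySem.Dict Int Int) p => d.modify (hash_pair p nb 2) 0 (· + 1)) (pairsOf b) c1 c2]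
    simp only [List.flatten_cons, List.flatMap_cons, List.map_append, List.foldl_append,
      List.foldl_map]

-- A's first pass computes three independent counters
theorem firstPassA_eq (nb : Int) (ebs : List (List Int)) :
    firstPassA nb ebs
    = (PySem.Dict.counter ebs.flatten,
       PySem.Dict.counter ((ebs.flatMap pairsOf).map (fun p => hash_pair p nb 1)),
       PySem.Dict.counter ((ebs.flatMap pairsOf).map (fun p => hash_pair p nb 2))) := by
  unfold firstPassA
  rw [stA_eq]
  simp only [PySem.Dict.counter_eq_foldl]

-- B's pass, from arbitrary starting dicts
theorem stB_eq (ebs : List (List Int)) (s : PySem.Dict Int Int) (c : PySem.Dict (Int × Int) Int) :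
    ebs.foldl
      (fun (st : PySem.Dict Int Int × PySem.Dict (Int × Int) Int) basket =>
        let singles := basket.foldl (fun d x => d.modify x 0 (· + 1)) st.1
        let pairs :=
          (PySem.List.pyRange 0 (PySem.List.len basket) 1).foldl
            (fun p i =>
              (PySem.List.pyRange (i + 1) (PySem.List.len basket) 1).foldl
                (fun p j =>
                  -- (a, b) if a <= b else (b, a)
                p.modify (if PySem.List.pyGetD basket i 0 ≤ PySem.List.pyGetD basket j 0
                          then (PySem.List.pyGetD basket i 0, PySem.List.pyGetD basket j 0)
                          else (PySem.List.pyGetD basket j 0, PySem.List.pyGetD basket i 0)) 0 (· + 1))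
                p)
            st.2
        (singles, pairs))
      (s, c)
    = (ebs.flatten.foldl (fun d x => d.modify x 0 (· + 1)) s,
       (ebs.flatMap pairsOf).foldl (fun d x => d.modify x 0 (· + 1)) c) := by
  induction ebs generalizing s c with
  | nil => rfl
  | cons b ebs ih =>
    simp only [List.foldl_cons]
    rw [ih]
    have hsp : ∀ a b : Int, (if a ≤ b then (a, b) else (b, a)) = sortedPair a b := fun _ _ => rfl
    simp only [hsp]
    rw [nested_foldl b (fun (d : PySem.Dict (Int × Int) Int) pair => d.modify pair 0 (· + 1)) c]
    simp only [List.flatten_cons, List.flatMap_cons, List.foldl_append]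

-- B's pass computes the two counters it needs
theorem onePassB_eq (ebs : List (List Int)) :
    onePassB ebs = (PySem.Dict.counter ebs.flatten, PySem.Dict.counter (ebs.flatMap pairsOf)) := by
  unfold onePassB
  rw [stB_eq]
  simp only [PySem.Dict.counter_eq_foldl]

-- A's second pass is a counter over the filtered pair stream
def pairCond (F : PySem.Set Int) (c1 c2 : PySem.Dict Int Int) (t nb : Int) (p : Int × Int) : Bool :=
  (PySem.Set.contains F p.1 && PySem.Set.contains F p.2) &&
    decide (c1.getD (hash_pair p nb 1) 0 ≥ t ∧ c2.getD (hash_pair p nb 2) 0 ≥ t)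

theorem secondPassA_eq (ebs : List (List Int)) (F : PySem.Set Int) (c1 c2 : PySem.Dict Int Int)
    (t nb : Int) :
    secondPassA ebs F c1 c2 t nb
    = PySem.Dict.counter ((ebs.flatMap pairsOf).filter (pairCond F c1 c2 t nb)) := by
  unfold secondPassA
  have hbody : ∀ (pc' : PySem.Dict (Int × Int) Int) (pair : Int × Int),
      (if PySem.Set.contains F pair.1 && PySem.Set.contains F pair.2 then
        (if c1.getD (hash_pair pair nb 1) 0 ≥ t ∧ c2.getD (hash_pair pair nb 2) 0 ≥ t then
          pc'.modify pair 0 (· + 1) else pc') else pc')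
        = (if pairCond F c1 c2 t nb pair then pc'.modify pair 0 (· + 1) else pc') := by
    intro pc' pair
    by_cases h1 : PySem.Set.contains F pair.1 && PySem.Set.contains F pair.2 <;>
      by_cases h2 : c1.getD (hash_pair pair nb 1) 0 ≥ t ∧ c2.getD (hash_pair pair nb 2) 0 ≥ t <;>
      simp [pairCond, h1, h2]
  simp only [hbody]
  rw [PySem.Dict.counter_eq_foldl, List.foldl_filter, List.foldl_flatMap]
  congr 1
  funext pc b
  exact nested_foldl b
    (fun pc pair => if pairCond F c1 c2 t nb pair then pc.modify pair 0 (· + 1) else pc) pc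

-- folding "if P kv then add kv.1" over distinct fresh keys appends the filtered keys
theorem foldl_add_if {α : Type} [BEq α] [LawfulBEq α] (P : (α × Int) → Prop) [DecidablePred P] :
    ∀ (l : List (α × Int)) (s : PySem.Set α), (l.map Prod.fst).Nodup → (∀ kv ∈ l, kv.1 ∉ s) →
    l.foldl (fun s kv => if P kv then PySem.Set.add s kv.1 else s) s
      = s ++ (l.filter (fun kv => decide (P kv))).map Prod.fst := by
  intro l
  induction l with
  | nil => intro s _ _; simp
  | cons kv l ih =>
    intro s hnd hfresh
    simp only [List.map_cons, List.nodup_cons] at hnd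
    have hadd : ∀ t : PySem.Set α, kv.1 ∉ t → PySem.Set.add t kv.1 = t ++ [kv.1] := by
      intro t ht; simp [PySem.Set.add, PySem.Set.contains, ht]
    by_cases hp : P kv
    · simp only [List.foldl_cons, if_pos hp, hadd s (hfresh kv (by simp))]
      rw [ih (s ++ [kv.1]) hnd.2]
      · simp [hp]
      · intro kv' h'
        simp only [List.mem_append, List.mem_singleton]
        rintro (h | h)
        · exact hfresh kv' (by simp [h']) h
        · exact hnd.1 (h ▸ List.mem_map_of_mem h')
    · simp only [List.foldl_cons, if_neg hp]
      rw [ih s hnd.2 (fun kv' h' => hfresh kv' (by simp [h']))]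
      simp [hp]

-- filtering commutes with set-building (first occurrences)
theorem filter_foldl_add {α : Type} [BEq α] [LawfulBEq α] (q : α → Bool) :
    ∀ (xs s : List α), (xs.foldl PySem.Set.add s).filter q = (xs.filter q).foldl PySem.Set.add (s.filter q) := by
  intro xs
  induction xs with
  | nil => intro s; simp
  | cons x xs ih =>
    intro s
    simp only [List.foldl_cons, List.filter_cons]
    rw [ih]
    by_cases hq : q x
    · simp only [hq, if_pos, List.foldl_cons]
      congr 1
      by_cases hx : x ∈ s
      · have hm : x ∈ s.filter q := List.mem_filter.2 ⟨hx, hq⟩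
        simp [PySem.Set.add, PySem.Set.contains, hx, hm]
      · have hm : x ∉ s.filter q := fun h => hx (List.mem_filter.1 h).1
        simp [PySem.Set.add, PySem.Set.contains, hx, hm, List.filter_append, hq]
    · simp only [hq, Bool.false_eq_true, if_false]
      congr 1
      by_cases hx : x ∈ s
      · simp [PySem.Set.add, PySem.Set.contains, hx]
      · simp [PySem.Set.add, PySem.Set.contains, hx, List.filter_append, hq]

theorem ofList_filter {α : Type} [BEq α] [LawfulBEq α] (q : α → Bool) (xs : List α) :
    PySem.Set.ofList (xs.filter q) = (PySem.Set.ofList xs).filter q := by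
  rw [PySem.Set.ofList_eq_foldl, PySem.Set.ofList_eq_foldl, filter_foldl_add]
  rfl

-- selecting from a counter's items is filtering the distinct elements by their counts
theorem counter_select {α : Type} [BEq α] [LawfulBEq α] (xs : List α)
    (P : α × Int → Prop) [DecidablePred P] :
    (PySem.Dict.counter xs).items.foldl
      (fun s kv => if P kv then PySem.Set.add s kv.1 else s) PySem.Set.empty
    = (PySem.Set.ofList xs).filter (fun k => decide (P (k, (xs.count k : Int)))) := by
  rw [PySem.Dict.items_counter, foldl_add_if P]
  · rw [List.filter_map, List.map_map]
    simp [Function.comp_def]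
  · simp only [List.map_map]
    simpa [Function.comp_def] using PySem.Set.nodup_ofList xs
  · intro kv _ h
    simp [PySem.Set.empty] at h

theorem freqSelect_eq (t : Int) (xs : List Int) :
    freqSelect t (PySem.Dict.counter xs)
    = (PySem.Set.ofList xs).filter (fun k => decide ((xs.count k : Int) ≥ t)) := by
  unfold freqSelect
  exact counter_select xs (fun kv => kv.2 ≥ t)

theorem freqSelectP_eq (t : Int) (xs : List (Int × Int)) :
    freqSelect t (PySem.Dict.counter xs)
    = (PySem.Set.ofList xs).filter (fun k => decide ((xs.count k : Int) ≥ t)) := by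
  unfold freqSelect
  exact counter_select xs (fun kv => kv.2 ≥ t)

theorem selectB_eq (t : Int) (flat : List Int) (ps : List (Int × Int)) :
    selectB t (PySem.Dict.counter flat) (PySem.Dict.counter ps)
    = (PySem.Set.ofList ps).filter
        (fun k => decide ((ps.count k : Int) ≥ t ∧
          (PySem.Dict.counter flat).getD k.1 0 ≥ t ∧ (PySem.Dict.counter flat).getD k.2 0 ≥ t)) := by
  unfold selectB
  exact counter_select ps
    (fun kv => kv.2 ≥ t ∧
      (PySem.Dict.counter flat).getD kv.1.1 0 ≥ t ∧ (PySem.Dict.counter flat).getD kv.1.2 0 ≥ t)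

-- components of an enumerated pair are items of the basket
theorem mem_pairsOf_components {basket : List Int} {p : Int × Int} (h : p ∈ pairsOf basket) :
    p.1 ∈ basket ∧ p.2 ∈ basket := by
  simp only [pairsOf, List.mem_flatMap, List.mem_map] at h
  obtain ⟨i, hi, j, hj, rfl⟩ := h
  rw [PySem.List.mem_pyRange_one] at hi hj
  have hlen : PySem.List.len basket = (basket.length : Int) := PySem.List.len_eq basket
  have h1 : PySem.List.pyGetD basket i 0 ∈ basket := by
    apply PySem.List.pyGetD_mem
    unfold PySem.Raise.InRange
    omega
  have h2 : PySem.List.pyGetD basket j 0 ∈ basket := by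
    apply PySem.List.pyGetD_mem
    unfold PySem.Raise.InRange
    omega
  unfold sortedPair
  split <;> exact ⟨by assumption, by assumption⟩

-- the pointwise comparison of the two final filters
theorem pointwise (flat : List Int) (ps : List (Int × Int)) (t nb : Int) (k : Int × Int)
    (hk1 : k.1 ∈ flat) (hk2 : k.2 ∈ flat) :
    (decide ((List.count k
        (ps.filter (pairCond
          ((PySem.Set.ofList flat).filter (fun x => decide ((flat.count x : Int) ≥ t)))
          (PySem.Dict.counter (ps.map (fun p => hash_pair p nb 1)))
          (PySem.Dict.counter (ps.map (fun p => hash_pair p nb 2))) t nb)) : Int) ≥ t)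
      && pairCond
          ((PySem.Set.ofList flat).filter (fun x => decide ((flat.count x : Int) ≥ t)))
          (PySem.Dict.counter (ps.map (fun p => hash_pair p nb 1)))
          (PySem.Dict.counter (ps.map (fun p => hash_pair p nb 2))) t nb k)
    = decide ((ps.count k : Int) ≥ t ∧
        (PySem.Dict.counter flat).getD k.1 0 ≥ t ∧ (PySem.Dict.counter flat).getD k.2 0 ≥ t) := by
  have hcontains : ∀ (s : PySem.Set Int) (x : Int), PySem.Set.contains s x = true ↔ x ∈ s := by
    intro s x; simp [PySem.Set.contains]
  have hmemF : ∀ x : Int, x ∈ ((PySem.Set.ofList flat).filter (fun x => decide ((flat.count x : Int) ≥ t)))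
      ↔ (x ∈ flat ∧ (flat.count x : Int) ≥ t) := by
    intro x
    simp [List.mem_filter, PySem.Set.mem_ofList]
  have hbucket1 : ((ps.count k : Int) ≥ t) →
      ((PySem.Dict.counter (ps.map (fun p => hash_pair p nb 1))).getD (hash_pair k nb 1) 0 ≥ t) := by
    intro h
    rw [PySem.Dict.getD_counter]
    have := List.count_le_count_map (l := ps) (f := fun p => hash_pair p nb 1) (x := k)
    have h2 : ((ps.count k : Int)) ≤ (((ps.map (fun p => hash_pair p nb 1)).count (hash_pair k nb 1) : Nat) : Int) := by
      exact_mod_cast this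
    omega
  have hbucket2 : ((ps.count k : Int) ≥ t) →
      ((PySem.Dict.counter (ps.map (fun p => hash_pair p nb 2))).getD (hash_pair k nb 2) 0 ≥ t) := by
    intro h
    rw [PySem.Dict.getD_counter]
    have := List.count_le_count_map (l := ps) (f := fun p => hash_pair p nb 2) (x := k)
    have h2 : ((ps.count k : Int)) ≤ (((ps.map (fun p => hash_pair p nb 2)).count (hash_pair k nb 2) : Nat) : Int) := by
      exact_mod_cast this
    omega
  simp only [PySem.Dict.getD_counter]
  by_cases hq : pairCond
      ((PySem.Set.ofList flat).filter (fun x => decide ((flat.count x : Int) ≥ t)))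
      (PySem.Dict.counter (ps.map (fun p => hash_pair p nb 1)))
      (PySem.Dict.counter (ps.map (fun p => hash_pair p nb 2))) t nb k
  · rw [List.count_filter hq, hq, Bool.and_true]
    have hs : (flat.count k.1 : Int) ≥ t ∧ (flat.count k.2 : Int) ≥ t := by
      have h1 := hq
      simp only [pairCond, Bool.and_eq_true, decide_eq_true_eq, hcontains, hmemF] at h1
      exact ⟨h1.1.1.2, h1.1.2.2⟩
    rw [decide_eq_decide]
    constructor
    · intro h; exact ⟨h, hs.1, hs.2⟩
    · intro h; exact h.1
  · have hqf := Bool.eq_false_iff.mpr hq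
    rw [hqf, Bool.and_false]
    rw [eq_comm, decide_eq_false_iff_not]
    rintro ⟨hcnt, hs1, hs2⟩
    apply hq
    simp only [pairCond, Bool.and_eq_true, decide_eq_true_eq, hcontains, hmemF]
    refine ⟨⟨⟨hk1, hs1⟩, ⟨hk2, hs2⟩⟩, ?_, ?_⟩
    · exact hbucket1 hcnt
    · exact hbucket2 hcnt

-- the central equality of the two programs
theorem ports_eq (each_baskets : List (List Int)) (supp_threshold : Int) (number_of_buckets : Int) :
    multihash_pcy each_baskets supp_threshold number_of_buckets
      = multihash_pcy_alt each_baskets supp_threshold number_of_buckets := by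
  simp only [multihash_pcy, multihash_pcy_alt]
  rw [firstPassA_eq, onePassB_eq]
  rw [freqSelect_eq, secondPassA_eq, freqSelectP_eq, selectB_eq]
  rw [ofList_filter, List.filter_filter]
  apply List.filter_congr
  intro k hk
  have hkps : k ∈ List.flatMap pairsOf each_baskets := (PySem.Set.mem_ofList _ k).1 hk
  obtain ⟨b, hb, hkb⟩ := List.mem_flatMap.1 hkps
  obtain ⟨hc1, hc2⟩ := mem_pairsOf_components hkb
  exact pointwise each_baskets.flatten (List.flatMap pairsOf each_baskets)
    supp_threshold number_of_buckets k
    (List.mem_flatten.2 ⟨b, hb, hc1⟩) (List.mem_flatten.2 ⟨b, hb, hc2⟩)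

-- ===== VERDICT (by name: the statement is the Claim_ definition above) =====
theorem multihash_pcy_spec : Claim_equal_multihash_pcy := by
  intro eb t nb _ _
  unfold Spec_multihash_pcy
  exact ports_eq eb t nb
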